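-- pv_equiv track=rewrite | github.com/walid-saadelkhalk/runtrack-python | jour04/job14/main.py | my_long_word
-- ===== SOURCE A (Python) =====
-- def longueur_mot(mot):
--     longueur = 0
--     for _ in mot:
--         longueur += 1
--     return longueur
--
-- def my_long_word(longueur_minimale, phrase):
--     mot_actuel = ""
--     resultat = ""
--     en_mot = False
--
--     for letter in phrase:
--         # if letter.isalpha():
--         separators = " \t\r\n.,;:!?-()[]{}'"
--         if not letter in separators:
--             mot_actuel += letter
--             en_mot = True
--         elif en_mot:
--             if longueur_mot(mot_actuel) > longueur_minimale:
--                 resultat += mot_actuel + " "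
--             mot_actuel = ""
--             en_mot = False
--
--     if longueur_mot(mot_actuel) > longueur_minimale:
--         resultat += mot_actuel
--
--     return resultat
-- ===== SOURCE B (Python) =====
-- # Tokenize-then-process: walk the phrase by index yielding each maximal
-- # non-separator run together with whether a separator closed it; a long
-- # closed word contributes "word ", a long word ending the phrase just "word".
-- _SEPARATORS = set(" \t\r\n.,;:!?-()[]{}'")
--
-- def _words_with_terminator(phrase):
--     """Yield (word, closed) for each maximal run of non-separator characters;
--     closed tells whether the run was ended by a separator (vs end of phrase)."""
--     i, n = 0, len(phrase)
--     while i < n: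
--         if phrase[i] in _SEPARATORS:
--             i += 1
--             continue
--         j = i
--         while j < n and phrase[j] not in _SEPARATORS:
--             j += 1
--         yield phrase[i:j], j < n
--         i = j
--
-- def my_long_word(longueur_minimale, phrase):
--     pieces = []
--     for word, closed in _words_with_terminator(phrase):
--         if len(word) > longueur_minimale:
--             pieces.append(word + " " if closed else word)
--     return "".join(pieces)
-- ===== Notes on version B (the rewrite author's own statement) =====
-- stated objective: alternative
-- what changed: Replaced A's single stateful char-by-char scan (current-word accumulator plus in-word flag, result string grown inline) with a tokenize-then-process decomposition: an index-based tokenizer yields each maximal non-separator run together with whether a separator closed it, and a second pass keeps the long words, suffixing a space exactly to the closed ones, and joins them.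
import Mathlib
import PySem

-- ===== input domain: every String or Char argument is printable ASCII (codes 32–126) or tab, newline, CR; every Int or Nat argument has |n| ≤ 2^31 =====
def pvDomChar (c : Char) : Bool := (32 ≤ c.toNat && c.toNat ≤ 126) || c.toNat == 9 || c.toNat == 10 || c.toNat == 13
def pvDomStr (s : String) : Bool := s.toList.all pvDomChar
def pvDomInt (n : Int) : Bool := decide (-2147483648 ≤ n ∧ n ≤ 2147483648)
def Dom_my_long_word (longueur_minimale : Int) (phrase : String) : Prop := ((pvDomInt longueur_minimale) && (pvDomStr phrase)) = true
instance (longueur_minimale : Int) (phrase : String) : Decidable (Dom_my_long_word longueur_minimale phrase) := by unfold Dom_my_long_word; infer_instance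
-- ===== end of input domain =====

-- B replaces A's stateful char-by-char scan with a tokenizer yielding (word, closed-by-separator)
-- pairs followed by a filter-and-join pass; same return values everywhere.

-- the separator string " \t\r\n.,;:!?-()[]{}'" of both programs, as its character list
def pvSeps : List Char := [' ', '\t', '\r', '\n', '.', ',', ';', ':', '!', '?', '-', '(', ')', '[', ']', '{', '}', '\'']

-- ===== PORT A =====
def longueur_mot (mot : List Char) : Int := mot.foldl (fun n _ => n + 1) 0

def my_long_word (longueur_minimale : Int) (phrase : String) : String :=
  let st := phrase.toList.foldl
    (fun (st : List Char × List Char × Bool) letter =>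
      if !(pvSeps.contains letter) then (st.1 ++ [letter], st.2.1, true)
      else if st.2.2 then
        (if longueur_mot st.1 > longueur_minimale then ([], st.2.1 ++ st.1 ++ [' '], false)
         else ([], st.2.1, false))
      else st)
    ([], [], false)
  String.mk (if longueur_mot st.1 > longueur_minimale then st.2.1 ++ st.1 else st.2.1)

-- ===== PORT B =====
-- Source B's _words_with_terminator: its index loop over the string is transcribed as the
-- structural recursion on the remaining characters (exact: the slice phrase[i:j] is the
-- run c :: takeWhile, and j < n is 'the rest is nonempty')
def pvWordsWithTerminator : List Char → List (List Char × Bool)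
  | [] => []
  | c :: cs =>
    if pvSeps.contains c then pvWordsWithTerminator cs
    else (c :: cs.takeWhile (fun d => !pvSeps.contains d),
          !(cs.dropWhile (fun d => !pvSeps.contains d)).isEmpty) ::
         pvWordsWithTerminator (cs.dropWhile (fun d => !pvSeps.contains d))
termination_by cs => cs.length
decreasing_by
  all_goals simp
  exact List.length_dropWhile_le _ _

def my_long_word_alt (longueur_minimale : Int) (phrase : String) : String :=
  let pieces := (pvWordsWithTerminator phrase.toList).foldl
    (fun (acc : List (List Char)) p =>
      if longueur_minimale < (p.1.length : Int) then
        acc ++ [if p.2 then p.1 ++ [' '] else p.1]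
      else acc) []
  String.mk pieces.flatten

-- ===== PRECONDITION & SPEC =====
def Spec_my_long_word (longueur_minimale : Int) (phrase : String) (out : String) : Prop := out = my_long_word_alt longueur_minimale phrase
instance (longueur_minimale : Int) (phrase : String) (out : String) : Decidable (Spec_my_long_word longueur_minimale phrase out) := by unfold Spec_my_long_word; infer_instance

-- ===== CLAIM (what is proved, stated in full; the proofs are below) =====
def Claim_equal_my_long_word : Prop := ∀ (longueur_minimale : Int) (phrase : String), Dom_my_long_word longueur_minimale phrase → Spec_my_long_word longueur_minimale phrase (my_long_word longueur_minimale phrase)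

-- ===== LEMMAS AND PROOFS =====

-- A's loop body, named for the proofs
def pvStep (m : Int) : List Char × List Char × Bool → Char → List Char × List Char × Bool :=
  fun st letter =>
    if !(pvSeps.contains letter) then (st.1 ++ [letter], st.2.1, true)
    else if st.2.2 then
      (if longueur_mot st.1 > m then ([], st.2.1 ++ st.1 ++ [' '], false)
       else ([], st.2.1, false))
    else st

-- A's computation from a mid-loop state (mot, res); the flag is the invariant !mot.isEmpty
def pvF (m : Int) (mot res cs : List Char) : List Char :=
  let st := cs.foldl (pvStep m) (mot, res, !mot.isEmpty)
  if longueur_mot st.1 > m then st.2.1 ++ st.1 else st.2.1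

-- B's value, re-expressed as a flatMap over the tokens
def pvG (m : Int) (cs : List Char) : List Char :=
  (pvWordsWithTerminator cs).flatMap
    (fun p => if m < (p.1.length : Int) then (if p.2 then p.1 ++ [' '] else p.1) else [])

lemma my_long_word_eq_pvF (m : Int) (s : String) :
    my_long_word m s = String.mk (pvF m [] [] s.toList) := rfl

lemma pv_flatten_filter_map {α β : Type} (q : α → Bool) (f : α → List β) :
    ∀ l : List α, ((l.filter q).map f).flatten = l.flatMap (fun x => if q x then f x else []) := by
  intro l
  induction l with
  | nil => simp
  | cons a l ih =>
      by_cases h : q a = true <;> simp [h, ih]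

lemma my_long_word_alt_eq_pvG (m : Int) (s : String) :
    my_long_word_alt m s = String.mk (pvG m s.toList) := by
  simp only [my_long_word_alt, pvG]
  rw [PySem.List.foldl_append_ite (fun p : List Char × Bool => m < (p.1.length : Int))
    (fun p => if p.2 then p.1 ++ [' '] else p.1)]
  rw [List.nil_append, pv_flatten_filter_map]
  simp only [decide_eq_true_eq]

lemma longueur_mot_eq (w : List Char) : longueur_mot w = (w.length : Int) := by
  unfold longueur_mot
  rw [PySem.List.foldl_add w (fun _ => (1 : Int)) 0]
  simp

lemma pvF_nil (m : Int) (mot res : List Char) :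
    pvF m mot res [] = if m < (mot.length : Int) then res ++ mot else res := by
  simp only [pvF, List.foldl_nil, longueur_mot_eq, gt_iff_lt]

lemma pvF_cons_nonsep (m : Int) (mot res cs : List Char) (c : Char)
    (h : pvSeps.contains c = false) :
    pvF m mot res (c :: cs) = pvF m (mot ++ [c]) res cs := by
  have hmem : c ∉ pvSeps := by simpa using h
  have hE : (mot ++ [c]).isEmpty = false := by simp
  simp [pvF, pvStep, hmem, hE]

lemma pvF_cons_sep_nil (m : Int) (res cs : List Char) (c : Char)
    (h : pvSeps.contains c = true) :
    pvF m [] res (c :: cs) = pvF m [] res cs := by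
  have hmem : c ∈ pvSeps := by simpa using h
  simp [pvF, pvStep, hmem]

lemma pvF_cons_sep (m : Int) (mot res cs : List Char) (c : Char)
    (h : pvSeps.contains c = true) (hm : mot ≠ []) :
    pvF m mot res (c :: cs)
      = pvF m [] (if m < (mot.length : Int) then res ++ mot ++ [' '] else res) cs := by
  have hmem : c ∈ pvSeps := by simpa using h
  have hE : mot.isEmpty = false := by simpa using hm
  by_cases hq : m < (mot.length : Int) <;>
    simp [pvF, pvStep, hmem, hE, longueur_mot_eq, hq]

lemma pvF_run (m : Int) (w : List Char) (hw : ∀ c ∈ w, pvSeps.contains c = false) :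
    ∀ mot res cs, pvF m mot res (w ++ cs) = pvF m (mot ++ w) res cs := by
  induction w with
  | nil => intro mot res cs; simp
  | cons a w ih =>
      intro mot res cs
      have ha : pvSeps.contains a = false := hw a List.mem_cons_self
      rw [List.cons_append, pvF_cons_nonsep m mot res (w ++ cs) a ha,
        ih (fun c hc => hw c (List.mem_cons_of_mem _ hc)) (mot ++ [a]) res cs]
      simp

lemma pvF_res (m : Int) : ∀ (cs mot res : List Char),
    pvF m mot res cs = res ++ pvF m mot [] cs := by
  intro cs
  induction cs with
  | nil =>
      intro mot res
      rw [pvF_nil, pvF_nil]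
      split_ifs <;> simp
  | cons c cs ih =>
      intro mot res
      by_cases hc : pvSeps.contains c = true
      · by_cases hmot : mot = []
        · subst hmot
          rw [pvF_cons_sep_nil m res cs c hc, pvF_cons_sep_nil m [] cs c hc, ih, ih]
        · rw [pvF_cons_sep m mot res cs c hc hmot, pvF_cons_sep m mot [] cs c hc hmot]
          split_ifs with hq
          · rw [ih [] (res ++ mot ++ [' ']), ih [] ([] ++ mot ++ [' '])]
            simp
          · rw [ih [] res]
      · have hc' : pvSeps.contains c = false := by simpa using hc
        rw [pvF_cons_nonsep m mot res cs c hc', pvF_cons_nonsep m mot [] cs c hc', ih, ih]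

lemma pvTok_nil : pvWordsWithTerminator [] = [] := by rw [pvWordsWithTerminator]

lemma pvTok_sep (c : Char) (cs : List Char) (h : pvSeps.contains c = true) :
    pvWordsWithTerminator (c :: cs) = pvWordsWithTerminator cs := by
  rw [pvWordsWithTerminator]
  have hc : c ∈ pvSeps := by simpa using h
  simp [hc]

lemma pv_takeWhile_all_append {α : Type} (p : α → Bool) (t : List α)
    (ht : ∀ x ∈ t, p x = true) (d : α) (r : List α) (hd : p d = false) :
    (t ++ d :: r).takeWhile p = t := by
  rw [List.takeWhile_append]
  simp [List.takeWhile_eq_self_iff.mpr ht, hd]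

lemma pv_dropWhile_all_append {α : Type} (p : α → Bool) (t : List α)
    (ht : ∀ x ∈ t, p x = true) (d : α) (r : List α) (hd : p d = false) :
    (t ++ d :: r).dropWhile p = d :: r := by
  rw [List.dropWhile_append]
  simp [List.dropWhile_eq_nil_iff.mpr ht, hd]

-- the tokens of a leading maximal run: the run with its closed flag, then the rest's tokens
lemma pvTok_word (a : Char) (t rest : List Char)
    (ha : pvSeps.contains a = false)
    (ht : ∀ x ∈ t, pvSeps.contains x = false)
    (hrest : rest = [] ∨ ∃ d r, rest = d :: r ∧ pvSeps.contains d = true) :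
    pvWordsWithTerminator ((a :: t) ++ rest)
      = (a :: t, !rest.isEmpty) :: pvWordsWithTerminator rest := by
  have ht' : ∀ x ∈ t, (fun d => !pvSeps.contains d) x = true := by
    intro x hx; simp only [ht x hx, Bool.not_false]
  rw [List.cons_append, pvWordsWithTerminator]
  rcases hrest with rfl | ⟨d, r, rfl, hd⟩
  · simp only [List.append_nil, ha, Bool.false_eq_true, if_false,
      List.takeWhile_eq_self_iff.mpr ht', List.dropWhile_eq_nil_iff.mpr ht']
  · have hdp : (fun d => !pvSeps.contains d) d = false := by simp only [hd, Bool.not_true]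
    simp only [ha, Bool.false_eq_true, if_false,
      pv_takeWhile_all_append _ t ht' d r hdp, pv_dropWhile_all_append _ t ht' d r hdp]

lemma pvG_sep (m : Int) (c : Char) (cs : List Char) (h : pvSeps.contains c = true) :
    pvG m (c :: cs) = pvG m cs := by
  simp only [pvG, pvTok_sep c cs h]

lemma pvF_eq_pvG (m : Int) : ∀ (cs : List Char), pvF m [] [] cs = pvG m cs := by
  have H : ∀ (n : Nat) (cs : List Char), cs.length ≤ n → pvF m [] [] cs = pvG m cs := by
    intro n
    induction n with
    | zero =>
        intro cs hc
        have : cs = [] := List.eq_nil_of_length_eq_zero (Nat.le_zero.mp hc)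
        subst this
        rw [pvF_nil]
        simp [pvG, pvTok_nil]
    | succ n ih =>
        intro cs hc
        match cs with
        | [] =>
            rw [pvF_nil]
            simp [pvG, pvTok_nil]
        | c :: cs' =>
            by_cases hsep : pvSeps.contains c = true
            · rw [pvF_cons_sep_nil m [] cs' c hsep, pvG_sep m c cs' hsep]
              exact ih cs' (Nat.le_of_succ_le_succ (by simpa using hc))
            · have hsep' : pvSeps.contains c = false := by simpa using hsep
              set t := cs'.takeWhile (fun d => !pvSeps.contains d) with hT
              set rest := cs'.dropWhile (fun d => !pvSeps.contains d) with hR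
              have ht : ∀ x ∈ t, pvSeps.contains x = false := by
                intro x hx
                have := List.mem_takeWhile_imp hx; simpa using this
              have hns : ∀ x ∈ c :: t, pvSeps.contains x = false := by
                intro x hx
                rcases List.mem_cons.mp hx with rfl | hx
                · exact hsep'
                · exact ht x hx
              have hrest : rest = [] ∨ ∃ d r, rest = d :: r ∧ pvSeps.contains d = true := by
                cases hr : rest with
                | nil => exact Or.inl rfl
                | cons d r =>
                    refine Or.inr ⟨d, r, rfl, ?_⟩
                    have := List.head?_dropWhile_not (fun d => !pvSeps.contains d) cs'
                    rw [← hR, hr] at this; simpa using this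
              have hsplit : c :: cs' = (c :: t) ++ rest := by
                simp [hT, hR, List.takeWhile_append_dropWhile]
              rw [hsplit, pvF_run m _ hns [] []]
              have hGtok : pvG m ((c :: t) ++ rest)
                  = (if m < ((c :: t).length : Int) then
                      (if !rest.isEmpty then (c :: t) ++ [' '] else c :: t) else [])
                    ++ pvG m rest := by
                simp only [pvG, pvTok_word c t rest hsep' ht hrest, List.flatMap_cons]
              rw [hGtok]
              rcases hrest with hre | ⟨d, r, hre, hd⟩
              · rw [hre, pvF_nil]
                simp [pvG, pvTok_nil]
              · rw [hre] at hGtok ⊢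
                have hrlen : r.length ≤ n := by
                  have h1 : (d :: r).length ≤ cs'.length := by
                    rw [← hre, hR]; exact List.length_dropWhile_le _ _
                  simp only [List.length_cons] at h1 hc
                  omega
                rw [List.nil_append, pvF_cons_sep m (c :: t) [] r d hd (by simp),
                  pvF_res m r, ← pvF_cons_sep_nil m [] r d hd,
                  show pvF m [] [] (d :: r) = pvG m (d :: r) from by
                    rw [pvF_cons_sep_nil m [] r d hd, pvG_sep m d r hd]
                    exact ih r hrlen]
                simp only [List.isEmpty_cons, Bool.not_false, if_true]
                split_ifs <;> simp
  exact fun cs => H cs.length cs le_rfl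

-- ===== VERDICT (by name: the statement is the Claim_ definition above) =====
theorem my_long_word_spec : Claim_equal_my_long_word := by
  intro m s _
  unfold Spec_my_long_word
  rw [my_long_word_eq_pvF, my_long_word_alt_eq_pvG, pvF_eq_pvG]
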